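-- pv_equiv track=rewrite | github.com/cafrii/omega2 | 백준/Silver/1926. 그림/그림.py | solve
-- ===== SOURCE A (Python) =====
-- def solve(map1:list[list[int]]):
--     #
--     N,M = len(map1),len(map1[0])
--     visited = [ [0]*M for _ in range(N) ]
--
--     def mark_group(sy, sx):
--         stack = [(sy, sx)]
--         visited[sy][sx] = 1
--         extent = 1
--         deltas = [(0,-1),(0,1),(-1,0),(1,0)]
--
--         while stack:
--             y2,x2 = stack.pop()
--             for d in deltas:
--                 ny,nx = y2+d[0],x2+d[1]
--                 if not (0<=ny<N and 0<=nx<M):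
--                     continue
--                 if visited[ny][nx] or map1[ny][nx] == 0:
--                     continue
--                 stack.append((ny,nx))
--                 visited[ny][nx] = 1
--                 extent += 1
--             #
--         return extent
--
--     num_group = 0
--     max_extent = 0
--
--     for y in range(N):
--         for x in range(M):
--             if not map1[y][x] or visited[y][x]:
--                 continue
--             group_extent = mark_group(y,x)
--             num_group += 1
--             max_extent = max(max_extent, group_extent)
--
--     return num_group, max_extent
-- ===== SOURCE B (Python) =====
-- def solve(map1: list[list[int]]):
--     N, M = len(map1), len(map1[0])
--     seen = set()
--     num_group = 0
--     max_extent = 0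
--     for sy in range(N):
--         for sx in range(M):
--             if map1[sy][sx] == 0 or (sy, sx) in seen:
--                 continue
--             queue = [(sy, sx)]
--             seen.add((sy, sx))
--             size = 0
--             while queue:
--                 y, x = queue.pop(0)
--                 size += 1
--                 for ny, nx in ((y, x - 1), (y, x + 1), (y - 1, x), (y + 1, x)):
--                     if 0 <= ny < N and 0 <= nx < M and map1[ny][nx] != 0 and (ny, nx) not in seen:
--                         seen.add((ny, nx))
--                         queue.append((ny, nx))
--             num_group += 1
--             if size > max_extent:
--                 max_extent = size
--     return num_group, max_extent
-- ===== Notes on version B (the rewrite author's own statement) =====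
-- stated objective: alternative
-- what changed: Replaces the per-component DFS with an explicit LIFO stack and a 2-D visited matrix by a FIFO breadth-first flood fill over a set of seen coordinates, counting component size at dequeue instead of at push.
import Mathlib
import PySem

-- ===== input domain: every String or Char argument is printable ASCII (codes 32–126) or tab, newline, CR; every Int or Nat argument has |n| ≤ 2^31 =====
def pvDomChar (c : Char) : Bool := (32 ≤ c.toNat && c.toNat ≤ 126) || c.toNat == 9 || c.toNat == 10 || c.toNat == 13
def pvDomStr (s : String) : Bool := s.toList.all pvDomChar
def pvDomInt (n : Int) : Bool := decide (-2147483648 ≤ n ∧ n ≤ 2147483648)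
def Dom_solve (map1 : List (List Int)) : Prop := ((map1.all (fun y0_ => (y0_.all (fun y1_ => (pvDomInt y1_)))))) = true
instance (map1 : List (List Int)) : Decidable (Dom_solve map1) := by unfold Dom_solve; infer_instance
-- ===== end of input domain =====

-- B replaces A's depth-first flood fill (explicit LIFO stack + 2-D visited matrix, size counted
-- at push) by a breadth-first flood fill (FIFO queue + set of seen coordinates, size counted at
-- dequeue); equal return values are proved on Pre_solve.

-- ===== PORT A =====

-- map1[y][x] / visited[y][x], total form (0 out of range; every use is guarded in range under Pre_solve)
def cellD (g : List (List Int)) (y x : Int) : Int :=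
  ((PySem.List.pyGet? g y).bind (fun r => PySem.List.pyGet? r x)).getD 0

-- visited[y][x] = 1 (indices guarded non-negative and in range at every call site)
def markVis (v : List (List Int)) (y x : Int) : List (List Int) :=
  PySem.List.pySetD v y (PySem.List.pySetD (PySem.List.pyGetD v y []) x 1)

def inB (N M : Int) (c : Int × Int) : Bool :=
  decide (0 ≤ c.1 ∧ c.1 < N ∧ 0 ≤ c.2 ∧ c.2 < M)

def shapeOk (N M : Int) (v : List (List Int)) : Bool :=
  ((v.length : Int) == N) && v.all (fun r => ((r.length : Int) == M))

def cellsL (N M : Int) : List (Int × Int) :=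
  (PySem.List.pyRange 0 N 1).flatMap (fun i => (PySem.List.pyRange 0 M 1).map (fun j => (i, j)))

def cellsF (N M : Int) : Finset (Int × Int) := (cellsL N M).toFinset

def unmarked (N M : Int) (v : List (List Int)) : Nat :=
  ((cellsF N M).filter (fun c => cellD v c.1 c.2 = 0)).card

lemma mem_cellsF {N M : Int} {c : Int × Int} : c ∈ cellsF N M ↔ inB N M c = true := by
  obtain ⟨y, x⟩ := c
  simp only [cellsF, cellsL, List.mem_toFinset, List.mem_flatMap, List.mem_map,
    PySem.List.mem_pyRange_one, Prod.mk.injEq, inB, decide_eq_true_eq]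
  constructor
  · rintro ⟨i, hi, j, hj, rfl, rfl⟩
    omega
  · rintro ⟨h1, h2, h3, h4⟩
    exact ⟨y, by omega, x, by omega, rfl, rfl⟩

lemma shapeOk_iff {N M : Int} {v : List (List Int)} :
    shapeOk N M v = true ↔ (v.length : Int) = N ∧ ∀ r ∈ v, (r.length : Int) = M := by
  simp [shapeOk, List.all_eq_true]

lemma cellD_markVis {N M : Int} {v : List (List Int)} (hv : shapeOk N M v = true)
    {y x : Int} (hin : inB N M (y, x) = true) {y' x' : Int} (hy' : 0 ≤ y') (hx' : 0 ≤ x') :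
    cellD (markVis v y x) y' x' = if y' = y ∧ x' = x then 1 else cellD v y' x' := by
  rw [shapeOk_iff] at hv
  obtain ⟨hlen, hrows⟩ := hv
  simp only [inB, decide_eq_true_eq] at hin
  obtain ⟨hy0, hyN, hx0, hxM⟩ := hin
  have hylt : y.toNat < v.length := by omega
  have hrow : v[y.toNat]? = some v[y.toNat] := List.getElem?_eq_getElem hylt
  have hrlen : (v[y.toNat].length : Int) = M := hrows _ (List.getElem_mem hylt)
  have hxlt : x.toNat < v[y.toNat].length := by omega
  have hmv : markVis v y x = v.set y.toNat (v[y.toNat].set x.toNat 1) := by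
    rw [markVis, PySem.List.pySetD_of_nonneg _ _ hy0, PySem.List.pyGetD_of_nonneg _ _ hy0,
      PySem.List.pySetD_of_nonneg _ _ hx0]
    congr 1
    rw [List.getD, hrow]
    rfl
  rw [hmv, cellD, cellD, PySem.List.pyGet?_of_nonneg _ hy', PySem.List.pyGet?_of_nonneg _ hy']
  by_cases hyy : y' = y
  · subst hyy
    rw [List.getElem?_set, if_pos rfl, if_pos hylt, Option.bind_some, hrow, Option.bind_some]
    by_cases hxx : x' = x
    · subst hxx
      rw [PySem.List.pyGet?_of_nonneg _ hx', PySem.List.pyGet?_of_nonneg _ hx',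
        List.getElem?_set, if_pos rfl, if_pos hxlt]
      simp
    · rw [PySem.List.pyGet?_of_nonneg _ hx', PySem.List.pyGet?_of_nonneg _ hx',
        List.getElem?_set, if_neg (by omega)]
      simp [hxx]
  · rw [List.getElem?_set, if_neg (by omega)]
    simp [hyy]

lemma shapeOk_markVis {N M : Int} {v : List (List Int)} (hv : shapeOk N M v = true)
    {y x : Int} (hin : inB N M (y, x) = true) : shapeOk N M (markVis v y x) = true := by
  rw [shapeOk_iff] at hv ⊢
  obtain ⟨hlen, hrows⟩ := hv
  simp only [inB, decide_eq_true_eq] at hin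
  obtain ⟨hy0, hyN, hx0, hxM⟩ := hin
  have hylt : y.toNat < v.length := by omega
  have hmv : markVis v y x = v.set y.toNat ((v.getD y.toNat []).set x.toNat 1) := by
    rw [markVis, PySem.List.pySetD_of_nonneg _ _ hy0, PySem.List.pyGetD_of_nonneg _ _ hy0,
      PySem.List.pySetD_of_nonneg _ _ hx0]
  rw [hmv]
  refine ⟨by simp [hlen], ?_⟩
  intro r hr
  rcases List.mem_or_eq_of_mem_set hr with h | h
  · exact hrows r h
  · subst h
    simp only [List.length_set]
    apply hrows
    rw [List.getD_eq_getElem?_getD, List.getElem?_eq_getElem hylt]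
    exact List.getElem_mem hylt

lemma unmarked_markVis {N M : Int} {v : List (List Int)} (hv : shapeOk N M v = true)
    {y x : Int} (hin : inB N M (y, x) = true) (h0 : cellD v y x = 0) :
    unmarked N M (markVis v y x) + 1 = unmarked N M v := by
  have hmem : (y, x) ∈ (cellsF N M).filter (fun c => cellD v c.1 c.2 = 0) := by
    rw [Finset.mem_filter]
    exact ⟨mem_cellsF.mpr hin, h0⟩
  have hfil : (cellsF N M).filter (fun c => cellD (markVis v y x) c.1 c.2 = 0)
      = ((cellsF N M).filter (fun c => cellD v c.1 c.2 = 0)).erase (y, x) := by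
    ext c
    simp only [Finset.mem_filter, Finset.mem_erase]
    constructor
    · rintro ⟨hc, hc0⟩
      have hb := mem_cellsF.mp hc
      simp only [inB, decide_eq_true_eq] at hb
      rw [cellD_markVis hv hin (by omega) (by omega)] at hc0
      by_cases hxy : c.1 = y ∧ c.2 = x
      · rw [if_pos hxy] at hc0
        exact absurd hc0 (by norm_num)
      · rw [if_neg hxy] at hc0
        refine ⟨?_, hc, hc0⟩
        intro hcc
        exact hxy (by rw [hcc]; exact ⟨rfl, rfl⟩)
    · rintro ⟨hne, hc, hc0⟩
      have hb := mem_cellsF.mp hc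
      simp only [inB, decide_eq_true_eq] at hb
      refine ⟨hc, ?_⟩
      rw [cellD_markVis hv hin (by omega) (by omega)]
      rw [if_neg ?_]
      · exact hc0
      · rintro ⟨hc1, hc2⟩
        exact hne (by obtain ⟨cy, cx⟩ := c; simp_all)
  unfold unmarked
  rw [hfil, Finset.card_erase_of_mem hmem]
  have : 1 ≤ ((cellsF N M).filter (fun c => cellD v c.1 c.2 = 0)).card :=
    Finset.card_pos.mpr ⟨_, hmem⟩
  omega

def pvDeltas : List (Int × Int) := [(0, -1), (0, 1), (-1, 0), (1, 0)]

def stepA (g : List (List Int)) (N M : Int) (p : Int × Int)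
    (st : List (List Int) × List (Int × Int) × Int) (d : Int × Int) :
    List (List Int) × List (Int × Int) × Int :=
  let ny := p.1 + d.1
  let nx := p.2 + d.2
  if 0 ≤ ny ∧ ny < N ∧ 0 ≤ nx ∧ nx < M then
    if cellD st.1 ny nx ≠ 0 ∨ cellD g ny nx = 0 then st
    else (markVis st.1 ny nx, st.2.1 ++ [(ny, nx)], st.2.2 + 1)
  else st

lemma stepA_meas (g : List (List Int)) (N M : Int) (p : Int × Int)
    (v : List (List Int)) (s : List (Int × Int)) (e : Int) (d : Int × Int)
    (hsh : shapeOk N M v = true) :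
    shapeOk N M (stepA g N M p (v, s, e) d).1 = true ∧
    unmarked N M (stepA g N M p (v, s, e) d).1 + (stepA g N M p (v, s, e) d).2.1.length
      = unmarked N M v + s.length := by
  simp only [stepA]
  split_ifs with h1 h2
  · exact ⟨hsh, rfl⟩
  · have hin : inB N M (p.1 + d.1, p.2 + d.2) = true := by
      simp only [inB, decide_eq_true_eq]
      exact h1
    rw [not_or, not_not] at h2
    have := unmarked_markVis hsh hin h2.1
    refine ⟨shapeOk_markVis hsh hin, ?_⟩
    simp only [List.length_append, List.length_cons, List.length_nil]
    omega
  · exact ⟨hsh, rfl⟩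

lemma foldA_meas (g : List (List Int)) (N M : Int) (p : Int × Int) (ds : List (Int × Int))
    (st : List (List Int) × List (Int × Int) × Int) (hsh : shapeOk N M st.1 = true) :
    shapeOk N M (ds.foldl (stepA g N M p) st).1 = true ∧
    unmarked N M (ds.foldl (stepA g N M p) st).1 + (ds.foldl (stepA g N M p) st).2.1.length
      = unmarked N M st.1 + st.2.1.length := by
  induction ds generalizing st with
  | nil => exact ⟨hsh, rfl⟩
  | cons d ds ih =>
    rw [List.foldl_cons]
    obtain ⟨v, s, e⟩ := st
    obtain ⟨h1, h2⟩ := stepA_meas g N M p v s e d hsh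
    obtain ⟨h3, h4⟩ := ih _ h1
    refine ⟨h3, ?_⟩
    rw [h4]
    omega

def loopA (g : List (List Int)) (N M : Int) :
    List (List Int) → List (Int × Int) → Int → List (List Int) × Int
  | v, [], e => (v, e)
  | v, q :: qs, e =>
    if hv : shapeOk N M v = true then
      -- p := stack.pop() (the last element); the shape test is a totality guard only
      -- (visited always has shape N × M at every call), needed for termination
      let st := pvDeltas.foldl (stepA g N M ((q :: qs).getLast (List.cons_ne_nil q qs)))
        (v, (q :: qs).dropLast, e)
      loopA g N M st.1 st.2.1 st.2.2
    else (v, e)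
  termination_by v s _ => unmarked N M v + s.length
  decreasing_by
    obtain ⟨h1, h2⟩ := foldA_meas g N M ((q :: qs).getLast (List.cons_ne_nil q qs)) pvDeltas
      (v, (q :: qs).dropLast, e) hv
    simp only [List.length_dropLast, List.length_cons] at h2 ⊢
    omega

def visitA (g : List (List Int)) (N M : Int) (st : List (List Int) × Int × Int)
    (y x : Int) : List (List Int) × Int × Int :=
  if cellD g y x = 0 ∨ cellD st.1 y x ≠ 0 then st
  else
    -- mark_group(y, x): visited[y][x] = 1, stack = [(y, x)], extent = 1
    let mg := loopA g N M (markVis st.1 y x) [(y, x)] 1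
    (mg.1, st.2.1 + 1, max st.2.2 mg.2)

def solve (map1 : List (List Int)) : Int × Int :=
  let N : Int := map1.length
  let M : Int := (PySem.List.pyGetD map1 0 []).length
  let visited : List (List Int) := List.replicate N.toNat (List.replicate M.toNat (0 : Int))
  let r := (PySem.List.pyRange 0 N 1).foldl (fun st y =>
    (PySem.List.pyRange 0 M 1).foldl (fun st x => visitA map1 N M st y x) st)
    (visited, (0 : Int), (0 : Int))
  (r.2.1, r.2.2)

-- ===== PORT B =====

def nbrsOf (y x : Int) : List (Int × Int) := [(y, x - 1), (y, x + 1), (y - 1, x), (y + 1, x)]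

def unseenB (N M : Int) (seen : PySem.Set (Int × Int)) : Nat :=
  ((cellsF N M).filter (fun c => c ∉ seen)).card

def stepB (g : List (List Int)) (N M : Int)
    (st : PySem.Set (Int × Int) × List (Int × Int)) (c : Int × Int) :
    PySem.Set (Int × Int) × List (Int × Int) :=
  if (0 ≤ c.1 ∧ c.1 < N ∧ 0 ≤ c.2 ∧ c.2 < M) ∧ cellD g c.1 c.2 ≠ 0
      ∧ PySem.Set.contains st.1 c = false then
    (PySem.Set.add st.1 c, st.2 ++ [c])
  else st

lemma unseenB_add {N M : Int} {seen : PySem.Set (Int × Int)} {c : Int × Int}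
    (hin : inB N M c = true) (hns : c ∉ seen) :
    unseenB N M (PySem.Set.add seen c) + 1 = unseenB N M seen := by
  have hmem : c ∈ (cellsF N M).filter (fun c' => c' ∉ seen) := by
    rw [Finset.mem_filter]
    exact ⟨mem_cellsF.mpr hin, hns⟩
  have hfil : (cellsF N M).filter (fun c' => c' ∉ PySem.Set.add seen c)
      = ((cellsF N M).filter (fun c' => c' ∉ seen)).erase c := by
    ext c'
    simp only [Finset.mem_filter, Finset.mem_erase, PySem.Set.mem_add]
    tauto
  unfold unseenB
  rw [hfil, Finset.card_erase_of_mem hmem]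
  have : 1 ≤ ((cellsF N M).filter (fun c' => c' ∉ seen)).card :=
    Finset.card_pos.mpr ⟨_, hmem⟩
  omega

lemma stepB_meas (g : List (List Int)) (N M : Int) (seen : PySem.Set (Int × Int))
    (q : List (Int × Int)) (c : Int × Int) :
    unseenB N M (stepB g N M (seen, q) c).1 + (stepB g N M (seen, q) c).2.length
      = unseenB N M seen + q.length := by
  simp only [stepB]
  split_ifs with h1
  · obtain ⟨hb, _, hcon⟩ := h1
    have hns : c ∉ seen := by
      intro hmm
      rw [(PySem.Set.contains_iff seen c).mpr hmm] at hcon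
      cases hcon
    have := unseenB_add (N := N) (M := M) (by simp only [inB, decide_eq_true_eq]; exact hb) hns
    simp only [List.length_append, List.length_cons, List.length_nil]
    omega
  · rfl

lemma foldB_meas (g : List (List Int)) (N M : Int) (cs : List (Int × Int))
    (st : PySem.Set (Int × Int) × List (Int × Int)) :
    unseenB N M (cs.foldl (stepB g N M) st).1 + (cs.foldl (stepB g N M) st).2.length
      = unseenB N M st.1 + st.2.length := by
  induction cs generalizing st with
  | nil => rfl
  | cons c cs ih =>
    rw [List.foldl_cons]
    obtain ⟨seen, q⟩ := st
    have h1 := stepB_meas g N M seen q c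
    rw [ih _]
    omega

def loopB (g : List (List Int)) (N M : Int) :
    PySem.Set (Int × Int) → List (Int × Int) → Int → PySem.Set (Int × Int) × Int
  | seen, [], size => (seen, size)
  | seen, c :: rest, size =>
    -- y, x = queue.pop(0); size += 1; then scan the four neighbours
    let st := (nbrsOf c.1 c.2).foldl (stepB g N M) (seen, rest)
    loopB g N M st.1 st.2 (size + 1)
  termination_by seen q _ => unseenB N M seen + q.length
  decreasing_by
    have := foldB_meas g N M (nbrsOf c.1 c.2) (seen, rest)
    simp only [List.length_cons] at this ⊢
    omega



def visitB (g : List (List Int)) (N M : Int) (st : PySem.Set (Int × Int) × Int × Int)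
    (y x : Int) : PySem.Set (Int × Int) × Int × Int :=
  if cellD g y x = 0 ∨ PySem.Set.contains st.1 (y, x) = true then st
  else
    -- queue = [(y, x)], seen.add((y, x)), size = 0, then the BFS loop
    let bf := loopB g N M (PySem.Set.add st.1 (y, x)) [(y, x)] 0
    (bf.1, st.2.1 + 1, if bf.2 > st.2.2 then bf.2 else st.2.2)

def solve_alt (map1 : List (List Int)) : Int × Int :=
  let N : Int := map1.length
  let M : Int := (PySem.List.pyGetD map1 0 []).length
  let r := (PySem.List.pyRange 0 N 1).foldl (fun st sy =>
    (PySem.List.pyRange 0 M 1).foldl (fun st sx => visitB map1 N M st sy sx) st)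
    ((PySem.Set.empty : PySem.Set (Int × Int)), (0 : Int), (0 : Int))
  (r.2.1, r.2.2)

-- ===== PRECONDITION & SPEC =====
-- Pre_solve: exactly the inputs where the Python A returns: a non-empty grid whose rows
-- all have at least len(map1[0]) entries (otherwise A raises IndexError on map1[0] / map1[y][x]).
def Pre_solve (map1 : List (List Int)) : Prop :=
  map1 ≠ [] ∧ ∀ r ∈ map1, (map1.headD []).length ≤ r.length

instance (map1 : List (List Int)) : Decidable (Pre_solve map1) := by
  unfold Pre_solve; infer_instance

def pvWitness_solve : List (List Int) := [[1, 0], [1, 1]]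

def Spec_solve (map1 : List (List Int)) (out : Int × Int) : Prop := out = solve_alt map1
instance (map1 : List (List Int)) (out : Int × Int) : Decidable (Spec_solve map1 out) := by
  unfold Spec_solve; infer_instance

-- ===== CLAIM (what is proved, stated in full; the proofs are below) =====
def Claim_equal_solve : Prop := ∀ (map1 : List (List Int)), Dom_solve map1 → Pre_solve map1 → Spec_solve map1 (solve map1)

-- ===== LEMMAS AND PROOFS =====

def markedF (N M : Int) (v : List (List Int)) : Finset (Int × Int) :=
  (cellsF N M).filter (fun c => cellD v c.1 c.2 ≠ 0)

lemma mem_markedF {N M : Int} {v : List (List Int)} {c : Int × Int} :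
    c ∈ markedF N M v ↔ inB N M c = true ∧ cellD v c.1 c.2 ≠ 0 := by
  simp only [markedF, Finset.mem_filter, mem_cellsF]

lemma markedF_markVis {N M : Int} {v : List (List Int)} (hv : shapeOk N M v = true)
    {y x : Int} (hin : inB N M (y, x) = true) :
    markedF N M (markVis v y x) = insert (y, x) (markedF N M v) := by
  ext c
  obtain ⟨cy, cx⟩ := c
  have hb : (cy, cx) ∈ markedF N M (markVis v y x) → inB N M (cy, cx) = true :=
    fun h => (mem_markedF.mp h).1
  simp only [mem_markedF, Finset.mem_insert]
  constructor
  · rintro ⟨hc, hc0⟩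
    simp only [inB, decide_eq_true_eq] at hc
    rw [cellD_markVis hv hin (by omega) (by omega)] at hc0
    by_cases hxy : cy = y ∧ cx = x
    · left; exact Prod.ext_iff.mpr ⟨hxy.1, hxy.2⟩
    · right
      rw [if_neg hxy] at hc0
      exact ⟨by simp only [inB, decide_eq_true_eq]; omega, hc0⟩
  · rintro (h | ⟨hc, hc0⟩)
    · cases h
      have hb2 := hin
      simp only [inB, decide_eq_true_eq] at hb2
      refine ⟨hin, ?_⟩
      rw [cellD_markVis hv hin (by omega) (by omega), if_pos ⟨rfl, rfl⟩]
      norm_num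
    · simp only [inB, decide_eq_true_eq] at hc
      refine ⟨by simp only [inB, decide_eq_true_eq]; omega, ?_⟩
      rw [cellD_markVis hv hin (by omega) (by omega)]
      by_cases hxy : cy = y ∧ cx = x
      · rw [if_pos hxy]; norm_num
      · rw [if_neg hxy]; exact hc0

inductive Reach (g : List (List Int)) (N M : Int) (V : Finset (Int × Int))
    (P : Finset (Int × Int)) : Int × Int → Prop
  | base (c : Int × Int) (hc : c ∈ P) : Reach g N M V P c
  | step (p c : Int × Int) (hp : Reach g N M V P p) (hadj : c ∈ nbrsOf p.1 p.2)
      (hin : inB N M c = true) (hfil : cellD g c.1 c.2 ≠ 0) (hV : c ∉ V) :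
      Reach g N M V P c

noncomputable def RSet (g : List (List Int)) (N M : Int) (V P : Finset (Int × Int)) :
    Finset (Int × Int) :=
  @Finset.filter _ (Reach g N M V P) (Classical.decPred _) (cellsF N M ∪ P)

lemma mem_RSet {g : List (List Int)} {N M : Int} {V P : Finset (Int × Int)}
    {c : Int × Int} : c ∈ RSet g N M V P ↔ Reach g N M V P c := by
  classical
  rw [RSet]
  rw [Finset.filter_congr_decidable, Finset.mem_filter]
  constructor
  · exact fun h => h.2
  · intro h
    refine ⟨?_, h⟩
    cases h with
    | base c hc => exact Finset.mem_union_right _ hc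
    | step p c hp hadj hin hfil hV => exact Finset.mem_union_left _ (mem_cellsF.mpr hin)

lemma RSet_empty {g : List (List Int)} {N M : Int} {V : Finset (Int × Int)} :
    RSet g N M V ∅ = ∅ := by
  ext c
  simp only [mem_RSet, Finset.notMem_empty, iff_false]
  intro h
  induction h with
  | base c hc => exact absurd hc (Finset.notMem_empty c)
  | step p c hp hadj hin hfil hV ih => exact ih

lemma reach_pop {g : List (List Int)} {N M : Int} {V Nset P P' : Finset (Int × Int)}
    {p : Int × Int} (hp : p ∈ P)
    (hNmem : ∀ c, c ∈ Nset ↔ (c ∈ nbrsOf p.1 p.2 ∧ inB N M c = true ∧ cellD g c.1 c.2 ≠ 0 ∧ c ∉ V))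
    (hsub : P' ⊆ P ∪ Nset) (hsup : P ⊆ P' ∪ {p}) (hNP : Nset ⊆ P') (c : Int × Int) :
    Reach g N M V P c ↔ c ∈ P ∨ Reach g N M (V ∪ Nset) P' c := by
  constructor
  · intro h
    induction h with
    | base c hc => exact Or.inl hc
    | step p' c hp' hadj hin hfil hV ih =>
      by_cases hcN : c ∈ Nset
      · exact Or.inr (Reach.base c (hNP hcN))
      · have hcV' : c ∉ V ∪ Nset := by
          simp only [Finset.mem_union]
          rintro (h | h)
          · exact hV h
          · exact hcN h
        rcases ih with hP | hR
        · rcases Finset.mem_union.mp (hsup hP) with hP' | hpp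
          · exact Or.inr (Reach.step p' c (Reach.base p' hP') hadj hin hfil hcV')
          · have : p' = p := Finset.mem_singleton.mp hpp
            subst this
            exact absurd ((hNmem c).mpr ⟨hadj, hin, hfil, hV⟩) hcN
        · exact Or.inr (Reach.step p' c hR hadj hin hfil hcV')
  · rintro (h | h)
    · exact Reach.base c h
    · induction h with
      | base c hc =>
        rcases Finset.mem_union.mp (hsub hc) with h | h
        · exact Reach.base c h
        · obtain ⟨hadj, hin, hfil, hV⟩ := (hNmem c).mp h
          exact Reach.step p c (Reach.base p hp) hadj hin hfil hV
      | step p' c hp' hadj hin hfil hV ih =>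
        have hcV : c ∉ V := fun hc => hV (Finset.mem_union_left _ hc)
        exact Reach.step p' c ih hadj hin hfil hcV

lemma RSet_pop {g : List (List Int)} {N M : Int} {V Nset P P' : Finset (Int × Int)}
    {p : Int × Int} (hp : p ∈ P) (hPV : P ⊆ V)
    (hNmem : ∀ c, c ∈ Nset ↔ (c ∈ nbrsOf p.1 p.2 ∧ inB N M c = true ∧ cellD g c.1 c.2 ≠ 0 ∧ c ∉ V))
    (hsub : P' ⊆ P ∪ Nset) (hsup : P ⊆ P' ∪ {p}) (hNP : Nset ⊆ P') :
    V ∪ RSet g N M V P = (V ∪ Nset) ∪ RSet g N M (V ∪ Nset) P' ∧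
    ((RSet g N M V P) \ V).card
      = ((RSet g N M (V ∪ Nset) P') \ (V ∪ Nset)).card + Nset.card := by
  have hiff := reach_pop hp hNmem hsub hsup hNP
  have hsplit : (RSet g N M V P) \ V = ((RSet g N M (V ∪ Nset) P') \ (V ∪ Nset)) ∪ Nset := by
    ext c
    simp only [Finset.mem_sdiff, Finset.mem_union, mem_RSet, hiff c]
    constructor
    · rintro ⟨hP | hR, hV⟩
      · exact absurd (hPV hP) hV
      · by_cases hcN : c ∈ Nset
        · exact Or.inr hcN
        · exact Or.inl ⟨hR, by tauto⟩
    · rintro (⟨hR, hV⟩ | hN)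
      · exact ⟨Or.inr hR, fun h => hV (Or.inl h)⟩
      · obtain ⟨hadj, hin, hfil, hV⟩ := (hNmem c).mp hN
        exact ⟨Or.inr (Reach.base c (hNP hN)), hV⟩
  constructor
  · ext c
    simp only [Finset.mem_union, mem_RSet, hiff c]
    have h1 : c ∈ Nset → Reach g N M (V ∪ Nset) P' c := fun h => Reach.base c (hNP h)
    have h2 : c ∈ P → c ∈ V := fun h => hPV h
    tauto
  · rw [hsplit, Finset.card_union_of_disjoint]
    rw [Finset.disjoint_left]
    intro c hc hcN
    have := (Finset.mem_sdiff.mp hc).2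
    exact this (Finset.mem_union_right _ hcN)

def stepT (g : List (List Int)) (N M : Int)
    (st : List (List Int) × List (Int × Int) × Int) (c : Int × Int) :
    List (List Int) × List (Int × Int) × Int :=
  if 0 ≤ c.1 ∧ c.1 < N ∧ 0 ≤ c.2 ∧ c.2 < M then
    if cellD st.1 c.1 c.2 ≠ 0 ∨ cellD g c.1 c.2 = 0 then st
    else (markVis st.1 c.1 c.2, st.2.1 ++ [c], st.2.2 + 1)
  else st

lemma foldA_as_targets (g : List (List Int)) (N M : Int) (p : Int × Int)
    (st : List (List Int) × List (Int × Int) × Int) :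
    pvDeltas.foldl (stepA g N M p) st = (nbrsOf p.1 p.2).foldl (stepT g N M) st := by
  have hts : [(p.1 + 0, p.2 + -1), (p.1 + 0, p.2 + 1), (p.1 + -1, p.2 + 0), (p.1 + 1, p.2 + 0)]
      = nbrsOf p.1 p.2 := by
    simp only [nbrsOf, List.cons.injEq, Prod.mk.injEq]
    norm_num
    exact ⟨by omega, by omega⟩
  calc pvDeltas.foldl (stepA g N M p) st
      = [(p.1 + 0, p.2 + -1), (p.1 + 0, p.2 + 1), (p.1 + -1, p.2 + 0),
          (p.1 + 1, p.2 + 0)].foldl (stepT g N M) st := rfl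
    _ = (nbrsOf p.1 p.2).foldl (stepT g N M) st := by rw [hts]

def condT (g : List (List Int)) (N M : Int) (v : List (List Int)) (c : Int × Int) : Bool :=
  inB N M c && (cellD g c.1 c.2 != 0) && (cellD v c.1 c.2 == 0)

lemma nbrsOf_nodup (y x : Int) : (nbrsOf y x).Nodup := by
  simp [nbrsOf, Prod.ext_iff]
  omega

lemma foldT_char (g : List (List Int)) (N M : Int) (cs : List (Int × Int)) (hnd : cs.Nodup)
    (v : List (List Int)) (rest : List (Int × Int)) (e : Int) (hv : shapeOk N M v = true) :
    ∃ v', cs.foldl (stepT g N M) (v, rest, e)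
        = (v', rest ++ cs.filter (condT g N M v), e + (cs.filter (condT g N M v)).length)
      ∧ shapeOk N M v' = true
      ∧ markedF N M v' = markedF N M v ∪ (cs.filter (condT g N M v)).toFinset := by
  induction cs generalizing v rest e with
  | nil =>
    exact ⟨v, by simp, hv, by simp⟩
  | cons c cs ih =>
    rw [List.nodup_cons] at hnd
    obtain ⟨hc, hnd⟩ := hnd
    rw [List.foldl_cons]
    by_cases hcond : condT g N M v c = true
    · have hcond' := hcond
      simp only [condT, Bool.and_eq_true, bne_iff_ne, beq_iff_eq, ne_eq] at hcond'
      obtain ⟨⟨hin, hfil⟩, h0⟩ := hcond'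
      have hbd : (0 ≤ c.1 ∧ c.1 < N ∧ 0 ≤ c.2 ∧ c.2 < M) := by
        simpa only [inB, decide_eq_true_eq] using hin
      have hstep : stepT g N M (v, rest, e) c
          = (markVis v c.1 c.2, rest ++ [c], e + 1) := by
        rw [stepT]
        rw [if_pos hbd, if_neg (by rw [not_or, not_not]; exact ⟨h0, hfil⟩)]
      rw [hstep]
      have hin' : inB N M (c.1, c.2) = true := by
        simp only [inB, decide_eq_true_eq]; exact hbd
      have hv1 : shapeOk N M (markVis v c.1 c.2) = true := shapeOk_markVis hv hin'
      have hfilt : cs.filter (condT g N M (markVis v c.1 c.2)) = cs.filter (condT g N M v) := by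
        apply List.filter_congr
        intro c' hc'
        have hne : ¬(c'.1 = c.1 ∧ c'.2 = c.2) := by
          rintro ⟨e1, e2⟩
          exact hc (by rw [← Prod.ext_iff.mpr ⟨e1, e2⟩]; exact hc')
        by_cases hin2 : inB N M c' = true
        · have hb2 : 0 ≤ c'.1 ∧ c'.1 < N ∧ 0 ≤ c'.2 ∧ c'.2 < M := by
            simpa only [inB, decide_eq_true_eq] using hin2
          simp only [condT]
          rw [cellD_markVis hv hin' (by omega) (by omega), if_neg hne]
        · simp only [Bool.not_eq_true] at hin2
          simp [condT, hin2]
      have hmk : markedF N M (markVis v c.1 c.2) = insert c (markedF N M v) := by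
        have := markedF_markVis hv hin'
        simpa using this
      obtain ⟨v', heq, hsh', hmark⟩ := ih hnd (markVis v c.1 c.2) (rest ++ [c]) (e + 1) hv1
      rw [hfilt] at heq hmark
      refine ⟨v', ?_, hsh', ?_⟩
      · rw [heq]
        have hfc : (c :: cs).filter (condT g N M v) = c :: cs.filter (condT g N M v) :=
          List.filter_cons_of_pos hcond
        rw [hfc]
        simp only [List.append_assoc, List.singleton_append, List.length_cons, Prod.mk.injEq]
        refine ⟨trivial, trivial, by push_cast; ring⟩
      · rw [hmark, hmk]
        have hfc : (c :: cs).filter (condT g N M v) = c :: cs.filter (condT g N M v) :=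
          List.filter_cons_of_pos hcond
        rw [hfc, List.toFinset_cons]
        ext a
        simp only [Finset.mem_union, Finset.mem_insert, List.mem_toFinset]
        tauto
    · have hstep : stepT g N M (v, rest, e) c = (v, rest, e) := by
        rw [stepT]
        simp only [condT, Bool.and_eq_true, bne_iff_ne, beq_iff_eq, ne_eq, inB,
          decide_eq_true_eq] at hcond
        by_cases hbd : (0 ≤ c.1 ∧ c.1 < N ∧ 0 ≤ c.2 ∧ c.2 < M)
        · rw [if_pos hbd, if_pos]
          by_cases hfil : cellD g c.1 c.2 = 0
          · exact Or.inr hfil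
          · left
            intro h0
            exact hcond ⟨⟨hbd, hfil⟩, h0⟩
        · rw [if_neg hbd]
      rw [hstep]
      have hflt : (c :: cs).filter (condT g N M v) = cs.filter (condT g N M v) :=
        List.filter_cons_of_neg (by simp [hcond])
      rw [hflt]
      exact ih hnd v rest e hv

lemma ns_mem_iff {g : List (List Int)} {N M : Int} {v : List (List Int)} {p c : Int × Int} :
    c ∈ ((nbrsOf p.1 p.2).filter (condT g N M v)).toFinset
      ↔ (c ∈ nbrsOf p.1 p.2 ∧ inB N M c = true ∧ cellD g c.1 c.2 ≠ 0
          ∧ c ∉ markedF N M v) := by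
  rw [List.mem_toFinset, List.mem_filter]
  simp only [condT, Bool.and_eq_true, bne_iff_ne, beq_iff_eq, ne_eq, mem_markedF, not_and,
    not_not]
  constructor
  · rintro ⟨hadj, ⟨hin, hfil⟩, h0⟩
    exact ⟨hadj, hin, hfil, fun _ => h0⟩
  · rintro ⟨hadj, hin, hfil, h0⟩
    exact ⟨hadj, ⟨hin, hfil⟩, h0 hin⟩

lemma loopA_spec_aux (g : List (List Int)) (N M : Int) (n : Nat) :
    ∀ (v : List (List Int)) (s : List (Int × Int)) (e : Int),
    unmarked N M v + s.length ≤ n →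
    shapeOk N M v = true → (∀ c ∈ s, c ∈ markedF N M v) →
    shapeOk N M (loopA g N M v s e).1 = true ∧
    markedF N M (loopA g N M v s e).1
      = markedF N M v ∪ RSet g N M (markedF N M v) s.toFinset ∧
    (loopA g N M v s e).2
      = e + (((RSet g N M (markedF N M v) s.toFinset) \ markedF N M v).card : Int) := by
  induction n with
  | zero =>
    intro v s e hm hv hs
    match s with
    | [] =>
      simp only [loopA]
      exact ⟨hv, by simp [RSet_empty], by simp [RSet_empty]⟩
    | q :: qs => simp at hm
  | succ n ihn =>
    intro v s e hm hv hs
    match s with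
    | [] =>
      simp only [loopA]
      exact ⟨hv, by simp [RSet_empty], by simp [RSet_empty]⟩
    | q :: qs =>
    have hne : (q :: qs) ≠ [] := List.cons_ne_nil q qs
    have hp_mem : (q :: qs).getLast hne ∈ (q :: qs) := List.getLast_mem hne
    obtain ⟨v', heq, hsh', hmark⟩ := foldT_char g N M
      (nbrsOf ((q :: qs).getLast hne).1 ((q :: qs).getLast hne).2)
      (nbrsOf_nodup _ _) v ((q :: qs).dropLast) e hv
    have hst : pvDeltas.foldl (stepA g N M ((q :: qs).getLast hne)) (v, (q :: qs).dropLast, e)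
        = (v', (q :: qs).dropLast ++ (nbrsOf ((q :: qs).getLast hne).1
            ((q :: qs).getLast hne).2).filter (condT g N M v),
          e + (((nbrsOf ((q :: qs).getLast hne).1
            ((q :: qs).getLast hne).2).filter (condT g N M v)).length : Int)) := by
      rw [foldA_as_targets]
      exact heq
    set p := (q :: qs).getLast hne with hp_def
    set rest := (q :: qs).dropLast with hrest_def
    set ns := (nbrsOf p.1 p.2).filter (condT g N M v) with hns_def
    have hnsnd : ns.Nodup := (nbrsOf_nodup p.1 p.2).filter _
    have hnscard : ns.toFinset.card = ns.length := List.toFinset_card_of_nodup hnsnd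
    have hrest_sub : ∀ c ∈ rest, c ∈ (q :: qs) := fun c hc => List.dropLast_subset _ hc
    have hs' : ∀ c ∈ rest ++ ns, c ∈ markedF N M v' := by
      intro c hc
      rw [hmark, Finset.mem_union]
      rcases List.mem_append.mp hc with h | h
      · exact Or.inl (hs c (hrest_sub c h))
      · exact Or.inr (List.mem_toFinset.mpr h)
    have hmeas : unmarked N M v' + (rest ++ ns).length = unmarked N M v + rest.length := by
      have := (foldA_meas g N M p pvDeltas (v, rest, e) hv).2
      rw [hst] at this
      exact this
    have hm' : unmarked N M v' + (rest ++ ns).length ≤ n := by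
      have hr : rest.length = qs.length := by
        rw [hrest_def, List.length_dropLast, List.length_cons]
        omega
      simp only [List.length_cons] at hm
      omega
    have hpop := RSet_pop (g := g) (N := N) (M := M)
      (V := markedF N M v) (Nset := ns.toFinset)
      (P := (q :: qs).toFinset) (P' := (rest ++ ns).toFinset)
      (p := p)
      (List.mem_toFinset.mpr hp_mem)
      (fun c hc => hs c (List.mem_toFinset.mp hc))
      (fun c => ns_mem_iff)
      (by
        intro c hc
        rw [List.toFinset_append, Finset.mem_union] at hc
        rw [Finset.mem_union]
        rcases hc with h | h
        · exact Or.inl (List.mem_toFinset.mpr (hrest_sub c (List.mem_toFinset.mp h)))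
        · exact Or.inr h)
      (by
        intro c hc
        have hcs : c ∈ rest ++ [p] := by
          rw [hrest_def, hp_def, List.dropLast_append_getLast hne]
          exact List.mem_toFinset.mp hc
        rw [Finset.mem_union, List.toFinset_append, Finset.mem_union]
        rcases List.mem_append.mp hcs with h | h
        · exact Or.inl (Or.inl (List.mem_toFinset.mpr h))
        · exact Or.inr (by simpa using h))
      (by
        intro c hc
        rw [List.toFinset_append, Finset.mem_union]
        exact Or.inr hc)
    obtain ⟨ih1, ih2, ih3⟩ := ihn v' (rest ++ ns) (e + (ns.length : Int)) hm' hsh' hs'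
    have hgoal_eq : loopA g N M v (q :: qs) e
        = loopA g N M v' (rest ++ ns) (e + (ns.length : Int)) := by
      simp only [loopA]
      rw [dif_pos hv, hst]
    rw [hgoal_eq]
    rw [hmark] at ih2 ih3
    refine ⟨ih1, ?_, ?_⟩
    · rw [ih2, ← hpop.1]
    · rw [ih3, hpop.2]
      push_cast [hnscard]
      ring

lemma loopA_spec (g : List (List Int)) (N M : Int) (v : List (List Int))
    (s : List (Int × Int)) (e : Int)
    (hv : shapeOk N M v = true) (hs : ∀ c ∈ s, c ∈ markedF N M v) :
    shapeOk N M (loopA g N M v s e).1 = true ∧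
    markedF N M (loopA g N M v s e).1
      = markedF N M v ∪ RSet g N M (markedF N M v) s.toFinset ∧
    (loopA g N M v s e).2
      = e + (((RSet g N M (markedF N M v) s.toFinset) \ markedF N M v).card : Int) :=
  loopA_spec_aux g N M (unmarked N M v + s.length) v s e le_rfl hv hs

lemma contains_eq_decide (s : PySem.Set (Int × Int)) (x : Int × Int) :
    PySem.Set.contains s x = decide (x ∈ s) := by
  by_cases h : x ∈ s
  · rw [(PySem.Set.contains_iff s x).mpr h, decide_eq_true h]
  · rw [decide_eq_false h]
    by_contra hc
    rw [Bool.not_eq_false] at hc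
    exact h ((PySem.Set.contains_iff s x).mp hc)

def condB (g : List (List Int)) (N M : Int) (seen : PySem.Set (Int × Int))
    (c : Int × Int) : Bool :=
  inB N M c && (cellD g c.1 c.2 != 0) && !(PySem.Set.contains seen c)

lemma foldB_char (g : List (List Int)) (N M : Int) (cs : List (Int × Int)) (hnd : cs.Nodup)
    (seen : PySem.Set (Int × Int)) (rest : List (Int × Int)) :
    cs.foldl (stepB g N M) (seen, rest)
      = (seen ++ cs.filter (condB g N M seen), rest ++ cs.filter (condB g N M seen)) := by
  induction cs generalizing seen rest with
  | nil => simp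
  | cons c cs ih =>
    rw [List.nodup_cons] at hnd
    obtain ⟨hc, hnd⟩ := hnd
    rw [List.foldl_cons]
    by_cases hcond : condB g N M seen c = true
    · have hcond' := hcond
      simp only [condB, Bool.and_eq_true, bne_iff_ne, beq_iff_eq, ne_eq, Bool.not_eq_eq_eq_not,
        Bool.not_true, inB, decide_eq_true_eq] at hcond'
      obtain ⟨⟨hbd, hfil⟩, hcon⟩ := hcond'
      have hns : c ∉ seen := by
        intro hmm
        rw [(PySem.Set.contains_iff seen c).mpr hmm] at hcon
        cases hcon
      have hstep : stepB g N M (seen, rest) c = (seen ++ [c], rest ++ [c]) := by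
        rw [stepB, if_pos ⟨hbd, hfil, hcon⟩, PySem.Set.add_of_not_mem hns]
      rw [hstep, ih hnd]
      have hfilt : cs.filter (condB g N M (seen ++ [c])) = cs.filter (condB g N M seen) := by
        apply List.filter_congr
        intro c' hc'
        have hne : c' ≠ c := fun h => hc (h ▸ hc')
        simp only [condB, contains_eq_decide, List.mem_append, List.mem_singleton, hne,
          or_false]
      rw [hfilt]
      have hfc : (c :: cs).filter (condB g N M seen) = c :: cs.filter (condB g N M seen) :=
        List.filter_cons_of_pos hcond
      rw [hfc]
      simp [List.append_assoc]
    · have hstep : stepB g N M (seen, rest) c = (seen, rest) := by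
        rw [stepB]
        simp only [condB, Bool.and_eq_true, bne_iff_ne, beq_iff_eq, ne_eq,
          Bool.not_eq_eq_eq_not, Bool.not_true, inB, decide_eq_true_eq] at hcond
        rw [if_neg]
        intro ⟨h1, h2, h3⟩
        exact hcond ⟨⟨h1, h2⟩, h3⟩
      rw [hstep]
      have hflt : (c :: cs).filter (condB g N M seen) = cs.filter (condB g N M seen) :=
        List.filter_cons_of_neg (by simp [hcond])
      rw [hflt]
      exact ih hnd seen rest

lemma nsB_mem_iff {g : List (List Int)} {N M : Int} {seen : PySem.Set (Int × Int)}
    {p c : Int × Int} :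
    c ∈ ((nbrsOf p.1 p.2).filter (condB g N M seen)).toFinset
      ↔ (c ∈ nbrsOf p.1 p.2 ∧ inB N M c = true ∧ cellD g c.1 c.2 ≠ 0
          ∧ c ∉ seen.toFinset) := by
  rw [List.mem_toFinset, List.mem_filter]
  simp only [condB, Bool.and_eq_true, bne_iff_ne, beq_iff_eq, ne_eq, Bool.not_eq_eq_eq_not,
    Bool.not_true, List.mem_toFinset, contains_eq_decide, decide_eq_false_iff_not]
  tauto

lemma loopB_spec_aux (g : List (List Int)) (N M : Int) (n : Nat) :
    ∀ (seen : PySem.Set (Int × Int)) (q : List (Int × Int)) (size : Int),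
    unseenB N M seen + q.length ≤ n →
    q.Nodup → (∀ c ∈ q, c ∈ seen) →
    (loopB g N M seen q size).1.toFinset
      = seen.toFinset ∪ RSet g N M seen.toFinset q.toFinset ∧
    (loopB g N M seen q size).2
      = size + (q.length : Int)
        + (((RSet g N M seen.toFinset q.toFinset) \ seen.toFinset).card : Int) := by
  induction n with
  | zero =>
    intro seen q size hm hnd hq
    match q with
    | [] =>
      simp only [loopB]
      exact ⟨by simp [RSet_empty], by simp [RSet_empty]⟩
    | c :: rest => simp at hm
  | succ n ihn =>
    intro seen q size hm hnd hq
    match q with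
    | [] =>
      simp only [loopB]
      exact ⟨by simp [RSet_empty], by simp [RSet_empty]⟩
    | c :: rest =>
    rw [List.nodup_cons] at hnd
    obtain ⟨hcr, hndr⟩ := hnd
    have hst := foldB_char g N M (nbrsOf c.1 c.2) (nbrsOf_nodup c.1 c.2) seen rest
    set ns := (nbrsOf c.1 c.2).filter (condB g N M seen) with hns_def
    have hnsnd : ns.Nodup := (nbrsOf_nodup c.1 c.2).filter _
    have hnscard : ns.toFinset.card = ns.length := List.toFinset_card_of_nodup hnsnd
    have hns_not_seen : ∀ a ∈ ns, a ∉ seen := by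
      intro a ha
      have := (nsB_mem_iff (p := c)).mp (List.mem_toFinset.mpr ha)
      rw [List.mem_toFinset] at this
      exact this.2.2.2
    have hmeas : unseenB N M (seen ++ ns) + (rest ++ ns).length
        = unseenB N M seen + rest.length := by
      have := foldB_meas g N M (nbrsOf c.1 c.2) (seen, rest)
      rw [hst] at this
      exact this
    have hm' : unseenB N M (seen ++ ns) + (rest ++ ns).length ≤ n := by
      simp only [List.length_cons] at hm
      omega
    have hnd' : (rest ++ ns).Nodup := by
      rw [List.nodup_append]
      refine ⟨hndr, hnsnd, ?_⟩
      intro a ha b hb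
      intro hab
      subst hab
      exact hns_not_seen a hb (hq a (List.mem_cons_of_mem c ha))
    have hq' : ∀ a ∈ rest ++ ns, a ∈ seen ++ ns := by
      intro a ha
      rw [List.mem_append] at ha ⊢
      rcases ha with h | h
      · exact Or.inl (hq a (List.mem_cons_of_mem c h))
      · exact Or.inr h
    have hpop := RSet_pop (g := g) (N := N) (M := M)
      (V := seen.toFinset) (Nset := ns.toFinset)
      (P := (c :: rest).toFinset) (P' := (rest ++ ns).toFinset)
      (p := c)
      (List.mem_toFinset.mpr (List.mem_cons_self))
      (fun a ha => List.mem_toFinset.mpr (hq a (List.mem_toFinset.mp ha)))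
      (fun a => nsB_mem_iff)
      (by
        intro a ha
        rw [List.toFinset_append, Finset.mem_union] at ha
        rw [Finset.mem_union]
        rcases ha with h | h
        · exact Or.inl (List.mem_toFinset.mpr
            (List.mem_cons_of_mem c (List.mem_toFinset.mp h)))
        · exact Or.inr h)
      (by
        intro a ha
        rw [List.mem_toFinset] at ha
        rw [Finset.mem_union, List.toFinset_append, Finset.mem_union]
        rcases List.mem_cons.mp ha with h | h
        · exact Or.inr (by simpa using h)
        · exact Or.inl (Or.inl (List.mem_toFinset.mpr h)))
      (by
        intro a ha
        rw [List.toFinset_append, Finset.mem_union]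
        exact Or.inr ha)
    obtain ⟨ih1, ih2⟩ := ihn (seen ++ ns) (rest ++ ns) (size + 1) hm' hnd' hq'
    have hgoal_eq : loopB g N M seen (c :: rest) size
        = loopB g N M (seen ++ ns) (rest ++ ns) (size + 1) := by
      simp only [loopB]
      rw [hst]
    rw [hgoal_eq]
    have hseenF : (seen ++ ns).toFinset = seen.toFinset ∪ ns.toFinset :=
      List.toFinset_append
    rw [hseenF] at ih1 ih2
    refine ⟨?_, ?_⟩
    · rw [ih1, ← hpop.1]
    · rw [ih2, hpop.2]
      simp only [List.length_append, List.length_cons]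
      push_cast [hnscard]
      ring

lemma loopB_spec (g : List (List Int)) (N M : Int) (seen : PySem.Set (Int × Int))
    (q : List (Int × Int)) (size : Int) (hnd : q.Nodup) (hq : ∀ c ∈ q, c ∈ seen) :
    (loopB g N M seen q size).1.toFinset
      = seen.toFinset ∪ RSet g N M seen.toFinset q.toFinset ∧
    (loopB g N M seen q size).2
      = size + (q.length : Int)
        + (((RSet g N M seen.toFinset q.toFinset) \ seen.toFinset).card : Int) :=
  loopB_spec_aux g N M (unseenB N M seen + q.length) seen q size le_rfl hnd hq

def RelAB (N M : Int) (stA : List (List Int) × Int × Int)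
    (stB : PySem.Set (Int × Int) × Int × Int) : Prop :=
  shapeOk N M stA.1 = true ∧ markedF N M stA.1 = stB.1.toFinset
    ∧ stA.2.1 = stB.2.1 ∧ stA.2.2 = stB.2.2

lemma visit_rel (g : List (List Int)) (N M : Int)
    (stA : List (List Int) × Int × Int) (stB : PySem.Set (Int × Int) × Int × Int)
    (y x : Int) (hy : 0 ≤ y ∧ y < N) (hx : 0 ≤ x ∧ x < M) (h : RelAB N M stA stB) :
    RelAB N M (visitA g N M stA y x) (visitB g N M stB y x) := by
  obtain ⟨v, numA, mxA⟩ := stA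
  obtain ⟨sn, numB, mxB⟩ := stB
  obtain ⟨h1, h2, h3, h4⟩ := h
  simp only at h1 h2 h3 h4
  have hin : inB N M (y, x) = true := by
    simp only [inB, decide_eq_true_eq]
    exact ⟨hy.1, hy.2, hx.1, hx.2⟩
  have hmem_iff : (y, x) ∈ sn ↔ cellD v y x ≠ 0 := by
    rw [← List.mem_toFinset, ← h2, mem_markedF]
    constructor
    · exact fun hh => hh.2
    · exact fun hh => ⟨hin, hh⟩
  have hcond : (cellD g y x = 0 ∨ PySem.Set.contains sn (y, x) = true)
      ↔ (cellD g y x = 0 ∨ cellD v y x ≠ 0) := by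
    rw [PySem.Set.contains_iff, hmem_iff]
  unfold visitA visitB
  by_cases hskip : cellD g y x = 0 ∨ cellD v y x ≠ 0
  · rw [if_pos hskip, if_pos (hcond.mpr hskip)]
    exact ⟨h1, h2, h3, h4⟩
  · rw [if_neg hskip, if_neg (fun hh => hskip (hcond.mp hh))]
    rw [not_or, not_not] at hskip
    obtain ⟨hfil, h0⟩ := hskip
    have hnm : (y, x) ∉ sn := by
      intro hm
      exact (hmem_iff.mp hm) h0
    have hsh1 : shapeOk N M (markVis v y x) = true := shapeOk_markVis h1 hin
    have hmk : markedF N M (markVis v y x) = insert (y, x) (markedF N M v) :=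
      markedF_markVis h1 hin
    have hadd : (PySem.Set.add sn (y, x)).toFinset = insert (y, x) sn.toFinset := by
      rw [PySem.Set.add_of_not_mem hnm, List.toFinset_append]
      ext a
      simp only [Finset.mem_union, List.mem_toFinset, List.mem_singleton, Finset.mem_insert]
      tauto
    have hVeq : markedF N M (markVis v y x) = (PySem.Set.add sn (y, x)).toFinset := by
      rw [hmk, hadd, h2]
    obtain ⟨a1, a2, a3⟩ := loopA_spec g N M (markVis v y x) [(y, x)] 1 hsh1
      (by
        intro c hc
        rw [List.mem_singleton] at hc
        subst hc
        rw [hmk]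
        exact Finset.mem_insert_self _ _)
    obtain ⟨b1, b2⟩ := loopB_spec g N M (PySem.Set.add sn (y, x)) [(y, x)] 0
      (List.nodup_singleton _)
      (by
        intro c hc
        rw [List.mem_singleton] at hc
        subst hc
        simp [PySem.Set.mem_add])
    rw [← hVeq] at b1 b2
    refine ⟨a1, ?_, ?_, ?_⟩
    · simp only
      rw [a2, b1]
    · simp only
      rw [h3]
    · simp only
      rw [b2, h4, a3]
      simp only [List.length_singleton, Nat.cast_one]
      set E : Int := (((RSet g N M (markedF N M (markVis v y x)) [(y, x)].toFinset)
          \ markedF N M (markVis v y x)).card : Int) with hE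
      by_cases hcmp : 0 + 1 + E > mxB
      · rw [if_pos hcmp]
        have h5 : max mxB (1 + E) = 1 + E := max_eq_right (by omega)
        rw [h5]
        ring
      · rw [if_neg hcmp]
        exact max_eq_left (by omega)

lemma foldRow_rel (g : List (List Int)) (N M : Int) (y : Int) (xs : List Int)
    (hy : 0 ≤ y ∧ y < N) (hxs : ∀ x ∈ xs, 0 ≤ x ∧ x < M) :
    ∀ (stA : List (List Int) × Int × Int) (stB : PySem.Set (Int × Int) × Int × Int),
    RelAB N M stA stB →
    RelAB N M (xs.foldl (fun st x => visitA g N M st y x) stA)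
      (xs.foldl (fun st x => visitB g N M st y x) stB) := by
  induction xs with
  | nil => exact fun stA stB h => h
  | cons x xs ih =>
    intro stA stB h
    rw [List.foldl_cons, List.foldl_cons]
    exact ih (fun x' hx' => hxs x' (List.mem_cons_of_mem x hx')) _ _
      (visit_rel g N M stA stB y x hy (hxs x List.mem_cons_self) h)

lemma foldAll_rel (g : List (List Int)) (N M : Int) (ys : List Int)
    (hys : ∀ y ∈ ys, 0 ≤ y ∧ y < N) :
    ∀ (stA : List (List Int) × Int × Int) (stB : PySem.Set (Int × Int) × Int × Int),
    RelAB N M stA stB →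
    RelAB N M
      (ys.foldl (fun st y => (PySem.List.pyRange 0 M 1).foldl
        (fun st x => visitA g N M st y x) st) stA)
      (ys.foldl (fun st y => (PySem.List.pyRange 0 M 1).foldl
        (fun st x => visitB g N M st y x) st) stB) := by
  induction ys with
  | nil => exact fun stA stB h => h
  | cons y ys ih =>
    intro stA stB h
    rw [List.foldl_cons, List.foldl_cons]
    refine ih (fun y' hy' => hys y' (List.mem_cons_of_mem y hy')) _ _ ?_
    exact foldRow_rel g N M y (PySem.List.pyRange 0 M 1) (hys y List.mem_cons_self)
      (fun x hx => by
        have := PySem.List.mem_pyRange_one.mp hx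
        exact ⟨this.1, this.2⟩) stA stB h

lemma cellD_replicate (n m : Nat) (y x : Int) :
    cellD (List.replicate n (List.replicate m (0 : Int))) y x = 0 := by
  rw [cellD]
  rcases Option.eq_none_or_eq_some (PySem.List.pyGet? (List.replicate n (List.replicate m (0 : Int))) y) with h | ⟨r, h⟩
  · rw [h]
    rfl
  · rw [h]
    have hr : r = List.replicate m (0 : Int) :=
      List.eq_of_mem_replicate (PySem.List.mem_of_pyGet?_eq_some _ h)
    subst hr
    simp only [Option.bind_some]
    rcases Option.eq_none_or_eq_some (PySem.List.pyGet? (List.replicate m (0 : Int)) x) with h2 | ⟨a, h2⟩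
    · rw [h2]
      rfl
    · rw [h2]
      have ha : a = 0 := List.eq_of_mem_replicate (PySem.List.mem_of_pyGet?_eq_some _ h2)
      subst ha
      rfl

theorem solve_spec_main (map1 : List (List Int)) : solve map1 = solve_alt map1 := by
  rw [solve, solve_alt]
  have hN0 : (0 : Int) ≤ (map1.length : Int) := by positivity
  have hM0 : (0 : Int) ≤ ((PySem.List.pyGetD map1 0 []).length : Int) := by positivity
  have hsh0 : shapeOk (map1.length : Int) ((PySem.List.pyGetD map1 0 []).length : Int)
      (List.replicate (map1.length : Int).toNat
        (List.replicate ((PySem.List.pyGetD map1 0 []).length : Int).toNat (0 : Int))) = true := by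
    rw [shapeOk_iff]
    constructor
    · rw [List.length_replicate]
      omega
    · intro r hr
      rw [List.eq_of_mem_replicate hr, List.length_replicate]
      omega
  have hmk0 : markedF (map1.length : Int) ((PySem.List.pyGetD map1 0 []).length : Int)
      (List.replicate (map1.length : Int).toNat
        (List.replicate ((PySem.List.pyGetD map1 0 []).length : Int).toNat (0 : Int)))
      = (∅ : Finset (Int × Int)) := by
    ext c
    simp only [mem_markedF, Finset.notMem_empty, iff_false, not_and, not_not]
    intro _
    exact cellD_replicate _ _ _ _
  have h0 : RelAB (map1.length : Int) ((PySem.List.pyGetD map1 0 []).length : Int)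
      (List.replicate (map1.length : Int).toNat
        (List.replicate ((PySem.List.pyGetD map1 0 []).length : Int).toNat (0 : Int)), 0, 0)
      ((PySem.Set.empty : PySem.Set (Int × Int)), 0, 0) := by
    refine ⟨hsh0, ?_, rfl, rfl⟩
    simp only [hmk0]
    rfl
  have hfin := foldAll_rel map1 (map1.length : Int) ((PySem.List.pyGetD map1 0 []).length : Int)
    (PySem.List.pyRange 0 (map1.length : Int) 1)
    (fun y hy => by
      have := PySem.List.mem_pyRange_one.mp hy
      exact ⟨this.1, this.2⟩) _ _ h0
  obtain ⟨-, -, e3, e4⟩ := hfin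
  rw [Prod.mk.injEq]
  exact ⟨e3, e4⟩

-- ===== VERDICT (by name: the statement is the Claim_ definition above) =====
theorem solve_spec : Claim_equal_solve := by
  intro map1 _ _
  show solve map1 = solve_alt map1
  exact solve_spec_main map1
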